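-- pv_equiv track=rewrite | github.com/dailythm/dailythm-GwonYeong | 2022/Nov/28(Mon)/1. 숫자 짝꿍.py | solution
-- ===== SOURCE A (Python) =====
-- def solution(X, Y):
--     answer = []
--     for i in range(9,-1,-1):
--         x = X.count(str(i))
--         y = Y.count(str(i))
--         for j in range(min(x,y)):
--             answer.append(str(i))
--     answer = ''.join(answer)
--     if answer == '':
--         return '-1'
--     if answer[0] == '0':
--         return '0'
--     return answer
-- ===== SOURCE B (Python) =====
-- def solution(X, Y):
--     xs = sorted((c for c in X if '0' <= c <= '9'), reverse=True)
--     ys = sorted((c for c in Y if '0' <= c <= '9'), reverse=True)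
--     out = []
--     i = j = 0
--     while i < len(xs) and j < len(ys):
--         a, b = xs[i], ys[j]
--         if a == b:
--             out.append(a)
--             i += 1
--             j += 1
--         elif a > b:
--             i += 1
--         else:
--             j += 1
--     if not out:
--         return '-1'
--     if out[0] == '0':
--         return '0'
--     return ''.join(out)
-- ===== Notes on version B (the rewrite author's own statement) =====
-- stated objective: alternative
-- what changed: A counts each digit 9..0 in both strings with str.count and appends min(x,y) copies per digit; B instead sorts the digit characters of each string descending and runs a two-pointer merge over the two sorted sequences, emitting a digit whenever both heads match, which yields the common multiset already in descending order.
import Mathlib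
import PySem

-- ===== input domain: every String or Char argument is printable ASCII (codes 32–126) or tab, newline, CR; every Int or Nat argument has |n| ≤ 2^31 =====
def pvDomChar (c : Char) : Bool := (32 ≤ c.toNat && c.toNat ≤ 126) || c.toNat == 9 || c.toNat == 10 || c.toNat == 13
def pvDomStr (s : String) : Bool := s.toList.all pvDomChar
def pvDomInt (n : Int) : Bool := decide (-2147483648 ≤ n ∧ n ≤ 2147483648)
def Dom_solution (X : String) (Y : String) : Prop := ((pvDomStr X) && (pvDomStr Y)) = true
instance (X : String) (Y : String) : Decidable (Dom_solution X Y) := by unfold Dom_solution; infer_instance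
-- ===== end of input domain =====

-- B replaces A's ten per-digit .count scans with a different algorithm: sort each string's
-- digit characters descending and take the common multiset by a two-pointer merge;
-- objective: alternative (a genuinely different algorithm of similar cost).

-- ===== PORT A =====
def solution (X : String) (Y : String) : String :=
  let answer : List String :=
    (PySem.List.pyRange 9 (-1) (-1)).foldl (fun answer i =>
      let x : Nat := PySem.Str.count X (PySem.Int.toStr i)
      let y : Nat := PySem.Str.count Y (PySem.Int.toStr i)
      (PySem.List.pyRange 0 ((min x y : Nat) : Int) 1).foldl
        (fun a _ => a ++ [PySem.Int.toStr i]) answer) []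
  let ans := PySem.Str.join "" answer
  if ans = "" then "-1"
  else if PySem.Str.pyGet? ans 0 = some '0' then "0"
  else ans

-- ===== PORT B =====
-- the while-loop with two pointers i, j is the structural recursion merge2 on the two
-- suffixes xs[i:], ys[j:]; '0' <= c <= '9' on single chars is the code-point comparison
def merge2 : List Char → List Char → List Char
  | [], _ => []
  | _ :: _, [] => []
  | a :: l1, b :: l2 =>
    if a = b then a :: merge2 l1 l2
    else if b < a then merge2 l1 (b :: l2)
    else merge2 (a :: l1) l2
termination_by l1 l2 => l1.length + l2.length

def digitsDesc (s : String) : List Char :=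
  PySem.List.sorted (s.toList.filter (fun c => decide ('0' ≤ c ∧ c ≤ '9'))) (fun c => c) true

-- ''.join(out) over single characters is String.ofList out
def solution_alt (X : String) (Y : String) : String :=
  match merge2 (digitsDesc X) (digitsDesc Y) with
  | [] => "-1"
  | c :: rest => if c = '0' then "0" else String.ofList (c :: rest)

-- ===== PRECONDITION & SPEC =====
def Spec_solution (X : String) (Y : String) (out : String) : Prop := out = solution_alt X Y
instance (X : String) (Y : String) (out : String) : Decidable (Spec_solution X Y out) := by unfold Spec_solution; infer_instance

-- ===== CLAIM (what is proved, stated in full; the proofs are below) =====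
def Claim_equal_solution : Prop := ∀ (X : String) (Y : String), Dom_solution X Y → Spec_solution X Y (solution X Y)

-- ===== LEMMAS AND PROOFS =====

lemma go_single (c : Char) : ∀ (fuel : Nat) (l : List Char) (acc : Nat), l.length ≤ fuel →
    PySem.Chars.count.go [c] fuel l acc = acc + l.count c := by
  intro fuel
  induction fuel with
  | zero => intro l acc h; cases l with
    | nil => simp [PySem.Chars.count.go]
    | cons a t => simp at h
  | succ n ih =>
    intro l acc h
    cases l with
    | nil => simp [PySem.Chars.count.go]
    | cons a t =>
      have ht : t.length ≤ n := by simpa using h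
      simp only [PySem.Chars.count.go]
      by_cases hc : c = a
      · subst hc
        simp only [List.isPrefixOf, BEq.rfl, Bool.true_and, if_pos, List.length_singleton,
          List.drop_succ_cons, List.drop_zero, List.count_cons, ih t (acc+1) ht]
        omega
      · simp [List.isPrefixOf, hc, Ne.symm hc, ih t acc ht]

lemma count_single (l : List Char) (c : Char) :
    PySem.Chars.count l [c] = l.count c := by
  simp only [PySem.Chars.count, List.isEmpty_cons, Bool.false_eq_true, if_false]
  rw [go_single c l.length l 0 le_rfl]
  omega

lemma count_toStr (s : String) (d : Int) (c : Char) (h : PySem.Int.toStr d = String.ofList [c]) :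
    PySem.Str.count s (PySem.Int.toStr d) = s.toList.count c := by
  rw [h, PySem.Str.count_eq, String.toList_ofList, count_single]

lemma char_toNat_inj {a b : Char} (h : a.toNat = b.toNat) : a = b := by
  apply Char.ext
  exact UInt32.toNat_inj.mp h

lemma foldl_append_replicate {α : Type} (s : α) : ∀ (l : List Int) (acc : List α),
    l.foldl (fun a _ => a ++ [s]) acc = acc ++ List.replicate l.length s := by
  intro l
  induction l with
  | nil => simp
  | cons x t ih =>
    intro acc
    rw [List.foldl_cons, ih, List.append_assoc, List.length_cons, List.replicate_succ,
      List.singleton_append]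

lemma inner_loop (n : Nat) (s : String) (acc : List String) :
    (PySem.List.pyRange 0 (n : Int) 1).foldl (fun a _ => a ++ [s]) acc
      = acc ++ List.replicate n s := by
  rw [foldl_append_replicate]
  simp [PySem.List.pyRange_zero_natCast]

lemma join_empty_sep (parts : List (List Char)) :
    PySem.Chars.join [] parts = parts.flatten := by
  induction parts with
  | nil => rfl
  | cons p t ih =>
    cases t with
    | nil => simp [PySem.Chars.join, List.intercalate]
    | cons q u =>
      simp only [PySem.Chars.join, List.intercalate, List.intersperse] at *
      simp only [List.flatten_cons]
      rw [List.nil_append, ih, List.flatten_cons]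

lemma flatten_replicate_singleton {α : Type} (n : Nat) (c : α) :
    (List.replicate n ([c] : List α)).flatten = List.replicate n c := by
  induction n with
  | zero => rfl
  | succ k ih => simp [List.replicate_succ, ih]

-- the common multiset, digit by digit, in descending order
def dRep (X Y : String) (c : Char) : List Char :=
  List.replicate (min (X.toList.count c) (Y.toList.count c)) c

def canon (X Y : String) : List Char :=
  dRep X Y '9' ++ dRep X Y '8' ++ dRep X Y '7' ++ dRep X Y '6' ++ dRep X Y '5' ++
  dRep X Y '4' ++ dRep X Y '3' ++ dRep X Y '2' ++ dRep X Y '1' ++ dRep X Y '0'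

def coreA (X Y : String) : String :=
  PySem.Str.join "" ((PySem.List.pyRange 9 (-1) (-1)).foldl (fun answer i =>
      let x : Nat := PySem.Str.count X (PySem.Int.toStr i)
      let y : Nat := PySem.Str.count Y (PySem.Int.toStr i)
      (PySem.List.pyRange 0 ((min x y : Nat) : Int) 1).foldl
        (fun a _ => a ++ [PySem.Int.toStr i]) answer) [])

set_option maxHeartbeats 1000000 in
lemma coreA_eq (X Y : String) : coreA X Y = String.ofList (canon X Y) := by
  unfold coreA canon dRep
  rw [show PySem.List.pyRange 9 (-1) (-1) = [9,8,7,6,5,4,3,2,1,0] from by decide]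
  simp only [List.foldl_cons, List.foldl_nil]
  rw [count_toStr X 9 '9' (by decide), count_toStr Y 9 '9' (by decide),
      count_toStr X 8 '8' (by decide), count_toStr Y 8 '8' (by decide),
      count_toStr X 7 '7' (by decide), count_toStr Y 7 '7' (by decide),
      count_toStr X 6 '6' (by decide), count_toStr Y 6 '6' (by decide),
      count_toStr X 5 '5' (by decide), count_toStr Y 5 '5' (by decide),
      count_toStr X 4 '4' (by decide), count_toStr Y 4 '4' (by decide),
      count_toStr X 3 '3' (by decide), count_toStr Y 3 '3' (by decide),
      count_toStr X 2 '2' (by decide), count_toStr Y 2 '2' (by decide),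
      count_toStr X 1 '1' (by decide), count_toStr Y 1 '1' (by decide),
      count_toStr X 0 '0' (by decide), count_toStr Y 0 '0' (by decide)]
  simp only [inner_loop]
  apply String.ext
  simp only [PySem.Str.join, String.toList_ofList,
    show (("":String).toList) = ([] : List Char) from rfl, join_empty_sep,
    List.map_append, List.map_replicate, List.map_nil,
    List.flatten_append, List.flatten_nil,
    flatten_replicate_singleton,
    show (PySem.Int.toStr 9).toList = ['9'] from rfl, show (PySem.Int.toStr 8).toList = ['8'] from rfl,
    show (PySem.Int.toStr 7).toList = ['7'] from rfl, show (PySem.Int.toStr 6).toList = ['6'] from rfl,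
    show (PySem.Int.toStr 5).toList = ['5'] from rfl, show (PySem.Int.toStr 4).toList = ['4'] from rfl,
    show (PySem.Int.toStr 3).toList = ['3'] from rfl, show (PySem.Int.toStr 2).toList = ['2'] from rfl,
    show (PySem.Int.toStr 1).toList = ['1'] from rfl, show (PySem.Int.toStr 0).toList = ['0'] from rfl]
  simp [List.append_assoc]

-- every element of the merge comes from the left list
lemma mem_merge2_left : ∀ (l1 l2 : List Char) (x : Char), x ∈ merge2 l1 l2 → x ∈ l1 := by
  intro l1 l2
  induction l1, l2 using merge2.induct with
  | case1 l2 => intro x hx; simp [merge2] at hx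
  | case2 a l1 => intro x hx; simp [merge2] at hx
  | case3 l1 b l2 ih =>
    intro x hx
    rw [merge2, if_pos rfl] at hx
    rcases List.mem_cons.1 hx with h | h
    · simp [h]
    · exact List.mem_cons_of_mem _ (ih x h)
  | case4 a l1 b l2 hab hba ih =>
    intro x hx
    rw [merge2, if_neg hab, if_pos hba] at hx
    exact List.mem_cons_of_mem _ (ih x hx)
  | case5 a l1 b l2 hab hba ih =>
    intro x hx
    rw [merge2, if_neg hab, if_neg hba] at hx
    exact ih x hx

lemma merge2_sorted : ∀ (l1 l2 : List Char),
    l1.Pairwise (fun a b => b ≤ a) → l2.Pairwise (fun a b => b ≤ a) →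
    (merge2 l1 l2).Pairwise (fun a b => b ≤ a) := by
  intro l1 l2
  induction l1, l2 using merge2.induct with
  | case1 l2 => intro _ _; simp [merge2]
  | case2 a l1 => intro _ _; simp [merge2]
  | case3 l1 b l2 ih =>
    intro h1 h2
    rw [merge2, if_pos rfl]
    refine List.pairwise_cons.2 ⟨?_, ih (List.pairwise_cons.1 h1).2 (List.pairwise_cons.1 h2).2⟩
    intro x hx
    exact (List.pairwise_cons.1 h1).1 x (mem_merge2_left _ _ x hx)
  | case4 a l1 b l2 hab hba ih =>
    intro h1 h2
    rw [merge2, if_neg hab, if_pos hba]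
    exact ih (List.pairwise_cons.1 h1).2 h2
  | case5 a l1 b l2 hab hba ih =>
    intro h1 h2
    rw [merge2, if_neg hab, if_neg hba]
    exact ih h1 (List.pairwise_cons.1 h2).2

lemma merge2_count : ∀ (l1 l2 : List Char),
    l1.Pairwise (fun a b => b ≤ a) → l2.Pairwise (fun a b => b ≤ a) →
    ∀ c, (merge2 l1 l2).count c = min (l1.count c) (l2.count c) := by
  intro l1 l2
  induction l1, l2 using merge2.induct with
  | case1 l2 => intro _ _ c; simp [merge2]
  | case2 a l1 => intro _ _ c; simp [merge2]
  | case3 l1 b l2 ih =>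
    intro h1 h2 c
    rw [merge2, if_pos rfl]
    simp only [List.count_cons,
      ih (List.pairwise_cons.1 h1).2 (List.pairwise_cons.1 h2).2 c]
    omega
  | case4 a l1 b l2 hab hba ih =>
    intro h1 h2 c
    rw [merge2, if_neg hab, if_pos hba, ih (List.pairwise_cons.1 h1).2 h2 c]
    by_cases hac : a = c
    · subst hac
      have hnot : a ∉ b :: l2 := by
        intro hmem
        rcases List.mem_cons.1 hmem with h | h
        · rw [h] at hba; exact lt_irrefl b hba
        · exact absurd ((List.pairwise_cons.1 h2).1 a h) (not_le.2 hba)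
      have h0 : (b :: l2).count a = 0 := List.count_eq_zero.2 hnot
      rw [h0]
      simp
    · simp [List.count_cons, hac]
  | case5 a l1 b l2 hab hba ih =>
    intro h1 h2 c
    have hlt : a < b := lt_of_le_of_ne (not_lt.1 hba) hab
    rw [merge2, if_neg hab, if_neg hba, ih h1 (List.pairwise_cons.1 h2).2 c]
    by_cases hbc : b = c
    · subst hbc
      have hnot : b ∉ a :: l1 := by
        intro hmem
        rcases List.mem_cons.1 hmem with h | h
        · rw [h] at hlt; exact lt_irrefl a hlt
        · exact absurd ((List.pairwise_cons.1 h1).1 b h) (not_le.2 hlt)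
      have h0 : (a :: l1).count b = 0 := List.count_eq_zero.2 hnot
      rw [h0]
      simp
    · simp [List.count_cons, hbc]

lemma digitsDesc_sorted (s : String) : (digitsDesc s).Pairwise (fun a b => b ≤ a) :=
  PySem.List.sorted_pairwise_rev _ _

lemma digitsDesc_count (s : String) (c : Char) :
    (digitsDesc s).count c =
      if '0' ≤ c ∧ c ≤ '9' then s.toList.count c else 0 := by
  unfold digitsDesc
  rw [(PySem.List.sorted_perm _ _ _).count_eq]
  by_cases hc : '0' ≤ c ∧ c ≤ '9'
  · rw [if_pos hc, List.count_filter (by simpa using hc)]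
  · rw [if_neg hc, List.count_eq_zero]
    intro hmem
    have := List.of_mem_filter hmem
    simp at this
    exact hc this

lemma rep_step (c : Char) (n : Nat) (l : List Char)
    (hl : l.Pairwise (fun a b => b ≤ a)) (hb : ∀ x ∈ l, x ≤ c) :
    (List.replicate n c ++ l).Pairwise (fun a b => b ≤ a) ∧
      ∀ x ∈ List.replicate n c ++ l, x ≤ c := by
  constructor
  · induction n with
    | zero => simpa
    | succ k ih =>
      rw [List.replicate_succ, List.cons_append]
      refine List.pairwise_cons.2 ⟨?_, ih⟩
      intro x hx
      rcases List.mem_append.1 hx with h | h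
      · exact le_of_eq (List.eq_of_mem_replicate h)
      · exact hb x h
  · intro x hx
    rcases List.mem_append.1 hx with h | h
    · exact le_of_eq (List.eq_of_mem_replicate h)
    · exact hb x h

set_option maxHeartbeats 2000000 in
lemma canon_sorted (X Y : String) : (canon X Y).Pairwise (fun a b => b ≤ a) := by
  unfold canon dRep
  have h0 := rep_step '0' (min (X.toList.count '0') (Y.toList.count '0')) [] (by simp) (by simp)
  have h1 := rep_step '1' (min (X.toList.count '1') (Y.toList.count '1')) _ h0.1
    (fun x hx => le_trans (h0.2 x hx) (by decide))
  have h2 := rep_step '2' (min (X.toList.count '2') (Y.toList.count '2')) _ h1.1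
    (fun x hx => le_trans (h1.2 x hx) (by decide))
  have h3 := rep_step '3' (min (X.toList.count '3') (Y.toList.count '3')) _ h2.1
    (fun x hx => le_trans (h2.2 x hx) (by decide))
  have h4 := rep_step '4' (min (X.toList.count '4') (Y.toList.count '4')) _ h3.1
    (fun x hx => le_trans (h3.2 x hx) (by decide))
  have h5 := rep_step '5' (min (X.toList.count '5') (Y.toList.count '5')) _ h4.1
    (fun x hx => le_trans (h4.2 x hx) (by decide))
  have h6 := rep_step '6' (min (X.toList.count '6') (Y.toList.count '6')) _ h5.1
    (fun x hx => le_trans (h5.2 x hx) (by decide))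
  have h7 := rep_step '7' (min (X.toList.count '7') (Y.toList.count '7')) _ h6.1
    (fun x hx => le_trans (h6.2 x hx) (by decide))
  have h8 := rep_step '8' (min (X.toList.count '8') (Y.toList.count '8')) _ h7.1
    (fun x hx => le_trans (h7.2 x hx) (by decide))
  have h9 := rep_step '9' (min (X.toList.count '9') (Y.toList.count '9')) _ h8.1
    (fun x hx => le_trans (h8.2 x hx) (by decide))
  simpa only [List.append_nil, List.append_assoc] using h9.1

lemma canon_count (X Y : String) (c : Char) :
    (canon X Y).count c =
      if '0' ≤ c ∧ c ≤ '9' then min (X.toList.count c) (Y.toList.count c) else 0 := by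
  unfold canon dRep
  simp only [List.count_append, List.count_replicate]
  by_cases h9 : c = '9'; · subst h9; simp
  by_cases h8 : c = '8'; · subst h8; simp
  by_cases h7 : c = '7'; · subst h7; simp
  by_cases h6 : c = '6'; · subst h6; simp
  by_cases h5 : c = '5'; · subst h5; simp
  by_cases h4 : c = '4'; · subst h4; simp
  by_cases h3 : c = '3'; · subst h3; simp
  by_cases h2 : c = '2'; · subst h2; simp
  by_cases h1 : c = '1'; · subst h1; simp
  by_cases h0 : c = '0'; · subst h0; simp
  have hnd : ¬ ('0' ≤ c ∧ c ≤ '9') := by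
    intro ⟨ha, hb⟩
    have ha' : 48 ≤ c.toNat := ha
    have hb' : c.toNat ≤ 57 := hb
    have n0 : c.toNat ≠ 48 := fun h => h0 (char_toNat_inj (h.trans (by decide)))
    have n1 : c.toNat ≠ 49 := fun h => h1 (char_toNat_inj (h.trans (by decide)))
    have n2 : c.toNat ≠ 50 := fun h => h2 (char_toNat_inj (h.trans (by decide)))
    have n3 : c.toNat ≠ 51 := fun h => h3 (char_toNat_inj (h.trans (by decide)))
    have n4 : c.toNat ≠ 52 := fun h => h4 (char_toNat_inj (h.trans (by decide)))
    have n5 : c.toNat ≠ 53 := fun h => h5 (char_toNat_inj (h.trans (by decide)))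
    have n6 : c.toNat ≠ 54 := fun h => h6 (char_toNat_inj (h.trans (by decide)))
    have n7 : c.toNat ≠ 55 := fun h => h7 (char_toNat_inj (h.trans (by decide)))
    have n8 : c.toNat ≠ 56 := fun h => h8 (char_toNat_inj (h.trans (by decide)))
    have n9 : c.toNat ≠ 57 := fun h => h9 (char_toNat_inj (h.trans (by decide)))
    omega
  simp [hnd, Ne.symm h0, Ne.symm h1, Ne.symm h2, Ne.symm h3, Ne.symm h4, Ne.symm h5, Ne.symm h6, Ne.symm h7, Ne.symm h8, Ne.symm h9]

lemma merge2_eq_canon (X Y : String) :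
    merge2 (digitsDesc X) (digitsDesc Y) = canon X Y := by
  refine List.Perm.eq_of_pairwise (fun a b _ _ h1 h2 => le_antisymm h2 h1)
    (merge2_sorted _ _ (digitsDesc_sorted X) (digitsDesc_sorted Y)) (canon_sorted X Y)
    (List.perm_iff_count.2 ?_)
  intro c
  rw [merge2_count _ _ (digitsDesc_sorted X) (digitsDesc_sorted Y) c,
    digitsDesc_count, digitsDesc_count, canon_count]
  by_cases hc : '0' ≤ c ∧ c ≤ '9' <;> simp [hc]

lemma solution_eq (X Y : String) : solution X Y = solution_alt X Y := by
  show (if coreA X Y = "" then "-1"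
        else if PySem.Str.pyGet? (coreA X Y) 0 = some '0' then "0" else coreA X Y)
     = solution_alt X Y
  unfold solution_alt
  rw [coreA_eq X Y, merge2_eq_canon X Y]
  cases h : canon X Y with
  | nil => simp
  | cons c rest =>
    have hne : String.ofList (c :: rest) ≠ "" := by
      intro habs
      have := congrArg String.toList habs
      simp at this
    rw [if_neg hne]
    have hget : PySem.Str.pyGet? (String.ofList (c :: rest)) 0 = some c := by
      simp [PySem.Str.pyGet?, PySem.List.pyGet?, PySem.List.pyIdx?]
    rw [hget]
    by_cases hc : c = '0'
    · subst hc; simp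
    · simp [hc]

-- ===== VERDICT (by name: the statement is the Claim_ definition above) =====
theorem solution_spec : Claim_equal_solution := by
  intro X Y _
  unfold Spec_solution
  exact solution_eq X Y
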